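-- pv_equiv track=rewrite | github.com/danieta/thunderboard | Desktop/Algdat2/oving3.py | find
-- ===== SOURCE A (Python) =====
-- def find(A, lower, upper):
--     # NOTICE: The result must be returned.
--     # SKRIV DIN KODE HER
--
--     nyLower = A[0]
--     nyUpper = A[len(A)-1]
--     for i in range(0,len(A)):
--         if (lower >= A[i]):
--             nyLower = A[i]
--         if (A[i] >= upper):
--             nyUpper = A[i]
--             break
--
--     return(nyLower, nyUpper)
-- ===== SOURCE B (Python) =====
-- def find(A, lower, upper):
--     # stop index: first element >= upper, else the last index
--     k = next((i for i, x in enumerate(A) if x >= upper), len(A) - 1)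
--     # last element <= lower in the scanned prefix, else A[0]
--     nyLower = next((x for x in reversed(A[:k + 1]) if x <= lower), A[0])
--     return (nyLower, A[k])
-- ===== Notes on version B (the rewrite author's own statement) =====
-- stated objective: simpler
-- what changed: A's single loop carrying two accumulators and a break is replaced by two direct searches: the first index with A[i] >= upper (default: last index) via next/enumerate, then the last element <= lower in that prefix via a reversed-prefix search.
import Mathlib
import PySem

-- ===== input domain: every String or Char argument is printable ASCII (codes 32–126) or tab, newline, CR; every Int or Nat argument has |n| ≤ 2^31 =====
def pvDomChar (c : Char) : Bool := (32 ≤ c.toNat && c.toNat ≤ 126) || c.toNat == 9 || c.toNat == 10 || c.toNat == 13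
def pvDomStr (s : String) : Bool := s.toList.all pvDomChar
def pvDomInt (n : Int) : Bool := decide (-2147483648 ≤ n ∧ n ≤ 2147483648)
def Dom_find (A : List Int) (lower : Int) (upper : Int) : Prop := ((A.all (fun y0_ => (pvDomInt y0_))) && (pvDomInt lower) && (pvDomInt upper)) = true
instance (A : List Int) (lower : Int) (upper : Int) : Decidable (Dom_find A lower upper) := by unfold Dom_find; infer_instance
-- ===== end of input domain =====

-- B replaces A's accumulator loop by two direct searches (first index with A[i] >= upper, else the
-- last index; then the last element <= lower in that prefix, searched from the right); objective:
-- simpler/idiomatic, same O(n) cost. Both Pythons raise IndexError on []; Pre_find excludes it.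

-- ===== PORT A =====
-- A's for-loop with its two accumulators and the break, as structural recursion over the list.
def findGo (lower upper : Int) : List Int → Int → Int → List Int
  | [], nl, nu => [nl, nu]
  | x :: xs, nl, nu =>
    let nl' := if lower ≥ x then x else nl
    if x ≥ upper then [nl', x] else findGo lower upper xs nl' nu

def find (A : List Int) (lower : Int) (upper : Int) : List Int :=
  match A with
  | [] => []  -- A[0] raises IndexError; excluded by Pre_find
  | a :: rest => findGo lower upper A a (rest.getLastD a)

-- ===== PORT B =====
def find_alt (A : List Int) (lower : Int) (upper : Int) : List Int :=
  match A with
  | [] => []  -- the default A[0] raises IndexError; excluded by Pre_find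
  | a :: _ =>
    -- k = next((i for i, x in enumerate(A) if x >= upper), len(A) - 1)
    let k : Int := match A.findIdx? (fun x => x ≥ upper) with
      | some i => (i : Int)
      | none => (A.length : Int) - 1
    -- nyLower = next((x for x in reversed(A[:k+1]) if x <= lower), A[0])
    let nyLower := ((PySem.List.slice A (some 0) (some (k + 1))).reverse.find?
        (fun x => x ≤ lower)).getD a
    -- A[k]; k is always in range for a nonempty list, so the default is never used
    let nyUpper := (PySem.List.pyGet? A k).getD 0
    [nyLower, nyUpper]

-- ===== PRECONDITION & SPEC =====
-- Pre_find excludes only the empty list, on which both Pythons raise IndexError.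
def Pre_find (A : List Int) (lower : Int) (upper : Int) : Prop := A ≠ []
instance (A : List Int) (lower : Int) (upper : Int) : Decidable (Pre_find A lower upper) := by unfold Pre_find; infer_instance
def pvWitness_find : List Int × Int × Int := ([1, 3, 7], 2, 5)

def Spec_find (A : List Int) (lower : Int) (upper : Int) (out : List Int) : Prop := out = find_alt A lower upper
instance (A : List Int) (lower : Int) (upper : Int) (out : List Int) : Decidable (Spec_find A lower upper out) := by unfold Spec_find; infer_instance

-- ===== CLAIM (what is proved, stated in full; the proofs are below) =====
def Claim_equal_find : Prop := ∀ (A : List Int) (lower : Int) (upper : Int), Dom_find A lower upper → Pre_find A lower upper → Spec_find A lower upper (find A lower upper)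

-- ===== LEMMAS AND PROOFS =====

-- find? over an appended singleton, with a default: the singleton folds into the default.
theorem getD_of_append_singleton (r : List Int) (x lower nl : Int) :
    ((r ++ [x]).find? (fun y => y ≤ lower)).getD nl
      = (r.find? (fun y => y ≤ lower)).getD (if x ≤ lower then x else nl) := by
  rw [List.find?_append]
  cases hf : r.find? (fun y => decide (y ≤ lower)) with
  | some v => simp
  | none => by_cases hl : x ≤ lower <;> simp [hl, List.find?]

-- The loop of A, characterised by B's two searches (general accumulators nl, nu).
theorem findGo_eq (lower upper : Int) : ∀ (l : List Int) (nl nu : Int),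
    findGo lower upper l nl nu =
      match l.findIdx? (fun x => x ≥ upper) with
      | some i => [((l.take (i + 1)).reverse.find? (fun x => x ≤ lower)).getD nl, (l[i]?).getD 0]
      | none => [(l.reverse.find? (fun x => x ≤ lower)).getD nl, nu] := by
  intro l
  induction l with
  | nil => intro nl nu; simp [findGo]
  | cons x xs ih =>
    intro nl nu
    by_cases hx : x ≥ upper
    · simp only [findGo, if_pos hx, List.findIdx?_cons, decide_eq_true hx, cond_true,
        List.take_succ_cons, List.take_zero, List.reverse_cons, List.reverse_nil,
        List.nil_append, List.getElem?_cons_zero, Option.getD_some]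
      by_cases hl : x ≤ lower
      · simp [List.find?, hl, ge_iff_le]
      · simp [List.find?, hl, ge_iff_le]
    · have hx' : (fun x => decide (x ≥ upper)) x = false := by simp [hx]
      simp only [findGo, if_neg hx, List.findIdx?_cons, hx', cond_false]
      rw [ih]
      cases hfi : xs.findIdx? (fun x => decide (x ≥ upper)) with
      | some i =>
        simp only [Option.map_some, List.take_succ_cons, List.reverse_cons,
          List.getElem?_cons_succ]
        rw [getD_of_append_singleton]
        by_cases hl : x ≤ lower <;> simp [hl, ge_iff_le]
      | none =>
        simp only [Option.map_none, List.reverse_cons]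
        rw [getD_of_append_singleton]
        by_cases hl : x ≤ lower <;> simp [hl, ge_iff_le]

-- Bridges from Source B's PySem primitives to take / getElem?.
theorem slice_zero_succ (l : List Int) (i : Nat) :
    PySem.List.slice l (some 0) (some ((i : Int) + 1)) = l.take (i + 1) := by
  have h : ((i : Int) + 1) = ((i + 1 : Nat) : Int) := by push_cast; ring
  rw [h, PySem.List.slice_zero_start, PySem.List.slice_to_natCast]

theorem pyGet_last (a : Int) (rest : List Int) :
    PySem.List.pyGet? (a :: rest) (((a :: rest).length : Int) - 1) = some (rest.getLastD a) := by
  have h : ((a :: rest).length : Int) - 1 = (((a :: rest).length - 1 : Nat) : Int) := by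
    simp only [List.length_cons]; push_cast; omega
  have h2 : some (rest.getLastD a) = (a :: rest)[(a :: rest).length - 1]? := by
    rw [List.getLastD_eq_getLast?, ← List.getLast?_cons, List.getLast?_eq_getElem?]
  rw [h, PySem.List.pyGet?_natCast, ← h2]

-- ===== VERDICT (by name: the statement is the Claim_ definition above) =====
theorem find_spec : Claim_equal_find := by
  intro A lower upper _ hpre
  unfold Spec_find
  match A with
  | [] => exact absurd rfl hpre
  | a :: rest =>
    show findGo lower upper (a :: rest) a (rest.getLastD a) = _
    rw [findGo_eq]
    show _ = find_alt (a :: rest) lower upper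
    unfold find_alt
    cases hfi : (a :: rest).findIdx? (fun x => x ≥ upper) with
    | some i =>
      simp only [slice_zero_succ, PySem.List.pyGet?_natCast]
    | none =>
      dsimp only
      have hk1 : ((a :: rest).length : Int) - 1 + 1 = (((a :: rest).length : Nat) : Int) := by ring
      rw [hk1, pyGet_last, PySem.List.slice_zero_start, PySem.List.slice_to_natCast]
      simp only [List.take_length, List.reverse_cons]
      rw [getD_of_append_singleton]
      by_cases hl : a ≤ lower <;> simp [hl]
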